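-- pv_equiv track=rewrite | github.com/NickKibish/iOS-Bluetooth-Numbers-Database | converter.py | remove_duplicates_with_suffix
-- ===== SOURCE A (Python) =====
-- def remove_duplicates_with_suffix(items):
--     name_count = {}  # Dictionary to store name counts
--
--     # Process each item
--     for item in items:
--         name = item['var_name']
--
--         # If the name is already encountered, increment count and update the name
--         if name in name_count:
--             name_count[name] += 1
--             new_name = f"{name}_{name_count[name]}"
--             item['var_name'] = new_name
--         else:
--             name_count[name] = 1  # First occurrence of the name
--
--     return items
-- ===== SOURCE B (Python) =====
-- def remove_duplicates_with_suffix(items):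
--     # Stage 1: build a full index of positions per var_name (one grouping pass).
--     groups = {}
--     for i, item in enumerate(items):
--         groups.setdefault(item['var_name'], []).append(i)
--     # Stage 2: walk each group; keep the first position, suffix the rest by rank.
--     for name, idxs in groups.items():
--         for j, i in enumerate(idxs[1:], start=2):
--             items[i]['var_name'] = f"{name}_{j}"
--     return items
-- ===== Notes on version B (the rewrite author's own statement) =====
-- stated objective: alternative
-- what changed: Replaces A's single streaming pass with a per-name running counter by two staged passes: first build a grouping dict mapping each var_name to the list of positions holding it, then rename each group's positions after the first by their rank in the group.
import Mathlib
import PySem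

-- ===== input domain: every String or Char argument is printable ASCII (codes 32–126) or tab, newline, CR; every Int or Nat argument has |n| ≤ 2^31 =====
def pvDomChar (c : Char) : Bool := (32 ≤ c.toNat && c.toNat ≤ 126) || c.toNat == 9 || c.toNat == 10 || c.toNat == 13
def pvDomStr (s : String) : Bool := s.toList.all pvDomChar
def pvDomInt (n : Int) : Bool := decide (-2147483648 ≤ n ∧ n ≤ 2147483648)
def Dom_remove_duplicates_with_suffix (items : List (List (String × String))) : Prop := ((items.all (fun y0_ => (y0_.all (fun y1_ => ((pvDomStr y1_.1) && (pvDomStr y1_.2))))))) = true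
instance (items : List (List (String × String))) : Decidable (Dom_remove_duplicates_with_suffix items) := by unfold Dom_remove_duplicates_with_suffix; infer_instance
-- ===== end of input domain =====

-- B replaces A's streaming name->counter pass by two staged passes: a grouping dict from each
-- var_name to its list of positions, then per-group renaming of every position after the first
-- by its rank; equivalence is about the RETURN value only (the Python A mutates the item dicts
-- in place, and so does B).


-- ===== PORT A =====
-- item['var_name'] is ported as get? + getD ""; Pre_ guarantees the key is present, so the
-- default is never read on admitted inputs (Python raises KeyError exactly where get? = none).
def remove_duplicates_with_suffix (items : List (List (String × String))) : List (List (String × String)) :=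
  (items.foldl
    (fun (st : PySem.Dict String Int × List (List (String × String))) item =>
      let name := ((PySem.Dict.mk item).get? "var_name").getD ""
      if st.1.contains name then
        let c := st.1.getD name 0 + 1
        (st.1.insert name c,
         st.2 ++ [(PySem.Dict.insert (PySem.Dict.mk item) "var_name"
                    (name ++ "_" ++ PySem.Int.toStr c)).items])
      else
        (st.1.insert name 1, st.2 ++ [item]))
    (PySem.Dict.empty, [])).2

-- ===== PORT B =====
-- groups.setdefault(name, []).append(i) is Dict.modify name [] (· ++ [i]); idxs[1:] is drop 1
-- (cf. PySem.List.slice_from); the index q.2 comes from our own enumerate so it is ≥ 0 and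
-- .toNat is exact; items[i]['var_name'] = … is List.set at i with the overwritten item dict.
def remove_duplicates_with_suffix_alt (items : List (List (String × String))) : List (List (String × String)) :=
  let groups := (PySem.List.enumerate items).foldl
    (fun d p => d.modify (((PySem.Dict.mk p.2).get? "var_name").getD "") [] (fun l => l ++ [p.1]))
    PySem.Dict.empty
  groups.items.foldl
    (fun acc pr =>
      (PySem.List.enumerate (pr.2.drop 1) 2).foldl
        (fun a q =>
          a.set q.2.toNat
            ((PySem.Dict.insert (PySem.Dict.mk (a.getD q.2.toNat [])) "var_name"
              (pr.1 ++ "_" ++ PySem.Int.toStr q.1)).items))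
        acc)
    items

-- ===== PRECONDITION & SPEC =====
-- Pre_ excludes exactly the inputs where the Python raises KeyError: an item without 'var_name'.
def Pre_remove_duplicates_with_suffix (items : List (List (String × String))) : Prop :=
  (items.all (fun item => (PySem.Dict.mk item).contains "var_name")) = true
instance (items : List (List (String × String))) : Decidable (Pre_remove_duplicates_with_suffix items) := by unfold Pre_remove_duplicates_with_suffix; infer_instance

def pvWitness_remove_duplicates_with_suffix : (List (List (String × String))) :=
  [[("var_name", "a")], [("var_name", "a")], [("var_name", "b")], [("var_name", "a")]]

def Spec_remove_duplicates_with_suffix (items : List (List (String × String))) (out : List (List (String × String))) : Prop := out = remove_duplicates_with_suffix_alt items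
instance (items : List (List (String × String))) (out : List (List (String × String))) : Decidable (Spec_remove_duplicates_with_suffix items out) := by unfold Spec_remove_duplicates_with_suffix; infer_instance

-- ===== CLAIM (what is proved, stated in full; the proofs are below) =====
def Claim_equal_remove_duplicates_with_suffix : Prop := ∀ (items : List (List (String × String))), Dom_remove_duplicates_with_suffix items → Pre_remove_duplicates_with_suffix items → Spec_remove_duplicates_with_suffix items (remove_duplicates_with_suffix items)

-- ===== LEMMAS AND PROOFS =====

-- the name A reads from an item (and B groups by)
def pvNm (item : List (String × String)) : String :=
  ((PySem.Dict.mk item).get? "var_name").getD ""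

-- the common specification element at position i, given the snapshot ns of all names
def pvOut (ns : List String) (i : Nat) (item : List (String × String)) : List (String × String) :=
  let n := ns.getD i ""
  let c := (ns.take i).count n
  if c ≠ 0 then
    (PySem.Dict.insert (PySem.Dict.mk item) "var_name"
      (n ++ "_" ++ PySem.Int.toStr ((c : Int) + 1))).items
  else item

-- the common specification: both ports produce this positional map
def pvSpec (items : List (List (String × String))) : List (List (String × String)) :=
  (PySem.List.enumerate items).map (fun p => pvOut (items.map pvNm) p.1.toNat p.2)

lemma pvOut_append (ns : List String) (m : String) (i : Nat) (hi : i < ns.length) (item : List (String × String)) :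
    pvOut (ns ++ [m]) i item = pvOut ns i item := by
  unfold pvOut
  rw [List.getD_append _ _ _ _ hi, List.take_append_of_le_length (le_of_lt hi)]

lemma pvSpec_append (xs : List (List (String × String))) (x : List (String × String)) :
    pvSpec (xs ++ [x]) = pvSpec xs ++ [pvOut (xs.map pvNm ++ [pvNm x]) xs.length x] := by
  unfold pvSpec
  rw [List.map_append, PySem.List.enumerate_append, List.map_append]
  congr 1
  · apply List.map_congr_left
    intro p hp
    obtain ⟨k, hk, rfl⟩ := (PySem.List.mem_enumerate_iff _ _ _).1 hp
    simp only [Int.zero_add, Int.toNat_natCast]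
    exact pvOut_append _ _ _ (by simpa using hk) _
  · simp [PySem.List.enumerate]

-- A's loop body, named so the invariant can be stated once
def pvStepA (st : PySem.Dict String Int × List (List (String × String)))
    (item : List (String × String)) :
    PySem.Dict String Int × List (List (String × String)) :=
  let name := pvNm item
  if st.1.contains name then
    let c := st.1.getD name 0 + 1
    (st.1.insert name c,
     st.2 ++ [(PySem.Dict.insert (PySem.Dict.mk item) "var_name"
                (name ++ "_" ++ PySem.Int.toStr c)).items])
  else
    (st.1.insert name 1, st.2 ++ [item])

lemma portA_eq (items : List (List (String × String))) :
    remove_duplicates_with_suffix items = (items.foldl pvStepA (PySem.Dict.empty, [])).2 := rfl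

-- the invariant of A's fold: the output so far is pvSpec on the processed prefix, and the dict
-- holds exactly the positive counts of names among the processed prefix
lemma foldA_inv (items : List (List (String × String))) :
    (items.foldl pvStepA (PySem.Dict.empty, [])).2 = pvSpec items ∧
    ∀ n, (items.foldl pvStepA (PySem.Dict.empty, [])).1.get? n =
      (if ((items.map pvNm).count n) = 0 then none
       else some (((items.map pvNm).count n : Int))) := by
  induction items using List.reverseRecOn with
  | nil =>
    refine ⟨rfl, fun n => ?_⟩
    simp [PySem.Dict.get?_empty]
  | append_singleton xs x ih =>
    obtain ⟨h2, h1⟩ := ih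
    rw [List.foldl_append, List.foldl_cons, List.foldl_nil]
    set st := xs.foldl pvStepA (PySem.Dict.empty, []) with hst
    have hcontains : st.1.contains (pvNm x) = decide ((xs.map pvNm).count (pvNm x) ≠ 0) := by
      rw [PySem.Dict.contains_eq_isSome_get?, h1]
      by_cases hc : (xs.map pvNm).count (pvNm x) = 0 <;> simp [hc]
    have hns : (xs ++ [x]).map pvNm = xs.map pvNm ++ [pvNm x] := by simp
    have hlen : (xs.map pvNm).length = xs.length := by simp
    have hgetD : (xs.map pvNm ++ [pvNm x]).getD xs.length "" = pvNm x := by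
      rw [← hlen]; simp
    have htake : (xs.map pvNm ++ [pvNm x]).take xs.length = xs.map pvNm := by
      rw [← hlen]; simp
    by_cases hc : (xs.map pvNm).count (pvNm x) = 0
    · have hstep : pvStepA st x = (st.1.insert (pvNm x) 1, st.2 ++ [x]) := by
        simp only [pvStepA]
        rw [hcontains]
        simp [hc]
      rw [hstep]
      constructor
      · rw [pvSpec_append, h2]
        unfold pvOut
        rw [hgetD, htake]
        simp [hc]
      · intro n
        rw [hns, PySem.Dict.get?_insert, List.count_append]
        by_cases hn : n = pvNm x
        · subst hn
          simp [hc]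
        · simp only [if_neg hn, h1 n, List.count_singleton]
          have : (pvNm x == n) = false := by simp [Ne.symm hn]
          simp [this]
    · have hgD : st.1.getD (pvNm x) 0 = (((xs.map pvNm).count (pvNm x) : Nat) : Int) := by
        rw [PySem.Dict.getD_eq_get?_getD, h1, if_neg hc]
        rfl
      have hstep : pvStepA st x =
          (st.1.insert (pvNm x) (((xs.map pvNm).count (pvNm x) : Int) + 1),
           st.2 ++ [(PySem.Dict.insert (PySem.Dict.mk x) "var_name"
              (pvNm x ++ "_" ++ PySem.Int.toStr (((xs.map pvNm).count (pvNm x) : Int) + 1))).items]) := by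
        simp only [pvStepA]
        rw [hcontains]
        simp [hc, hgD]
      rw [hstep]
      constructor
      · rw [pvSpec_append, h2]
        unfold pvOut
        rw [hgetD, htake]
        simp [hc]
      · intro n
        rw [hns, PySem.Dict.get?_insert, List.count_append]
        by_cases hn : n = pvNm x
        · subst hn
          simp only [List.count_singleton, BEq.rfl, if_pos]
          rw [if_neg (by omega)]
          norm_cast
        · simp only [if_neg hn, h1 n, List.count_singleton]
          have : (pvNm x == n) = false := by simp [Ne.symm hn]
          simp [this]

-- ======== B-side: grouping then per-group renaming equals the same positional map ========

-- the group of a name: the positions (in order) of ns holding it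
def pvG (ns : List String) (n : String) : List Int :=
  (((PySem.List.enumerate ns).filter (fun p => p.2 == n)).map (·.1))

-- renaming applied by B when it writes suffix j at a position holding item d
def pvRen (n : String) (j : Int) (d : List (String × String)) : List (String × String) :=
  (PySem.Dict.insert (PySem.Dict.mk d) "var_name" (n ++ "_" ++ PySem.Int.toStr j)).items

-- B's processing of one group, extracted
def pvUpd (ns : List String) (n : String) (acc : List (List (String × String))) :
    List (List (String × String)) :=
  (PySem.List.enumerate ((pvG ns n).drop 1) 2).foldl
    (fun a q => a.set q.2.toNat (pvRen n q.1 (a.getD q.2.toNat []))) acc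

lemma pvG_append (ns : List String) (x n : String) :
    pvG (ns ++ [x]) n = pvG ns n ++ (if x == n then [(ns.length : Int)] else []) := by
  unfold pvG
  rw [PySem.List.enumerate_append, List.filter_append, List.map_append]
  congr 1
  by_cases h : x == n <;> simp [PySem.List.enumerate, h]

lemma pvG_mem_bounds (ns : List String) (n : String) (e : Int) (he : e ∈ pvG ns n) :
    0 ≤ e ∧ e.toNat < ns.length := by
  unfold pvG at he
  obtain ⟨p, hp, rfl⟩ := List.mem_map.1 he
  obtain ⟨k, hk, rfl⟩ := (PySem.List.mem_enumerate_iff _ _ _).1 (List.mem_filter.1 hp).1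
  constructor <;> simp <;> omega

lemma pvG_nodup (ns : List String) (n : String) : (pvG ns n).Nodup := by
  have hp : (pvG ns n).Pairwise (· < ·) := by
    unfold pvG
    exact List.Pairwise.map _ (fun a b h => h)
      (List.Pairwise.filter _ (PySem.List.pairwise_lt_enumerate ns 0))
  exact hp.imp (fun h => by omega)

lemma pvG_length (ns : List String) (n : String) : (pvG ns n).length = ns.count n := by
  unfold pvG
  rw [List.length_map, ← List.countP_eq_length_filter]
  conv_rhs => rw [← PySem.List.map_snd_enumerate ns 0]
  rw [List.count, List.countP_map]
  rfl

-- the find? characterization: B's inner loop touches position i of its group exactly when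
-- i is a non-first occurrence of n, and then writes suffix (prefix count) + 1
lemma find_pvG (n : String) : ∀ (ns : List String) (i : Nat), i < ns.length →
    (PySem.List.enumerate ((pvG ns n).drop 1) 2).find? (fun q => q.2.toNat == i) =
      (if ns.getD i "" = n ∧ (ns.take i).count n ≠ 0
       then some ((((ns.take i).count n : Nat) : Int) + 1, (i : Int)) else none) := by
  intro ns
  induction ns using List.reverseRecOn with
  | nil => intro i hi; simp at hi
  | append_singleton xs x ih =>
    intro i hi
    have hmem_lt : ∀ q ∈ PySem.List.enumerate ((pvG xs n).drop 1) 2, q.2.toNat < xs.length := by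
      intro q hq
      have h2 : q.2 ∈ (pvG xs n).drop 1 := by
        have := List.mem_map_of_mem (f := fun p : Int × Int => p.2) hq
        rw [PySem.List.map_snd_enumerate] at this
        exact this
      exact (pvG_mem_bounds xs n q.2 (List.mem_of_mem_drop h2)).2
    rw [pvG_append]
    rcases Nat.lt_or_ge i xs.length with hlt | hge
    · rw [List.getD_append _ _ _ _ hlt, List.take_append_of_le_length (le_of_lt hlt)]
      by_cases hx : x = n
      · simp only [hx, beq_self_eq_true, if_pos]
        cases hg : pvG xs n with
        | nil =>
          have hc : (xs.take i).count n = 0 := by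
            have h0 : xs.count n = 0 := by
              rw [← pvG_length xs n, hg]; rfl
            have := ((xs.take_sublist i).count_le n)
            omega
          simp [hc]
        | cons g0 gt =>
          have hne : pvG xs n ≠ [] := by rw [hg]; simp
          rw [← hg, List.drop_append_of_le_length (by cases h : pvG xs n <;> simp_all),
            PySem.List.enumerate_append, List.find?_append]
          have hsingle : (PySem.List.enumerate [(xs.length : Int)]
              (2 + ((pvG xs n).drop 1).length)).find? (fun q => q.2.toNat == i) = none := by
            simp only [PySem.List.enumerate_cons, PySem.List.enumerate_nil, List.find?]
            have h2 : (xs.length == i) = false := by simp; omega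
            simp [h2]
          rw [hsingle, Option.or_none]
          exact ih i hlt
      · have : (x == n) = false := by simpa using hx
        rw [this]
        simpa using ih i hlt
    · have hi' : i = xs.length := by simp at hi; omega
      subst hi'
      have hgetD : (xs ++ [x]).getD xs.length "" = x := by
        simp [List.getD_eq_getElem?_getD]
      have htake : (xs ++ [x]).take xs.length = xs := by simp
      rw [hgetD, htake]
      by_cases hx : x = n
      · simp only [hx, beq_self_eq_true, if_pos]
        cases hg : pvG xs n with
        | nil =>
          have h0 : xs.count n = 0 := by rw [← pvG_length xs n, hg]; rfl
          simp [h0]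
        | cons g0 gt =>
          have hcnt : xs.count n = (pvG xs n).length := (pvG_length xs n).symm
          have hpos : 1 ≤ (pvG xs n).length := by rw [hg]; simp
          rw [← hg, List.drop_append_of_le_length (by cases h : pvG xs n <;> simp_all),
            PySem.List.enumerate_append, List.find?_append]
          have hfirst : (PySem.List.enumerate ((pvG xs n).drop 1) 2).find?
              (fun q => q.2.toNat == xs.length) = none := by
            rw [List.find?_eq_none]
            intro q hq
            have := hmem_lt q hq
            simp
            omega
          rw [hfirst, Option.none_or]
          simp only [PySem.List.enumerate_cons, PySem.List.enumerate_nil, List.find?]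
          have hT : ((xs.length : Int).toNat == xs.length) = true := by simp
          rw [hT]
          have hcond : xs.count n ≠ 0 := by omega
          rw [if_pos ⟨trivial, hcond⟩]
          have hdl : ((pvG xs n).drop 1).length = (pvG xs n).length - 1 := by simp
          have hfst : (2 : Int) + (((pvG xs n).drop 1).length : Int) = ((xs.count n : Nat) : Int) + 1 := by
            rw [hdl]; omega
          rw [hfst]
      · have hxb : (x == n) = false := by simpa using hx
        rw [hxb]
        simp only [Bool.false_eq_true, if_false, List.append_nil]
        rw [List.find?_eq_none.2 (by intro q hq; have := hmem_lt q hq; simp; omega)]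
        rw [if_neg (fun h => hx h.1)]

-- a fold of List.set at pairwise-distinct in-range nonneg positions, each read before write:
-- pointwise it applies f at the unique hit (if any) to the ORIGINAL entry
lemma foldl_set_getD (f : Int → List (String × String) → List (String × String)) :
    ∀ (ps : List (Int × Int)) (acc : List (List (String × String))),
      (ps.map (·.2)).Nodup → (∀ q ∈ ps, 0 ≤ q.2 ∧ q.2.toNat < acc.length) →
      ∀ i : Nat,
        (ps.foldl (fun a q => a.set q.2.toNat (f q.1 (a.getD q.2.toNat []))) acc).getD i [] =
          (match ps.find? (fun q => q.2.toNat == i) with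
           | some q => f q.1 (acc.getD i [])
           | none => acc.getD i []) := by
  intro ps
  induction ps with
  | nil => intro acc _ _ i; rfl
  | cons q ps ih =>
    intro acc hnd hb i
    rw [List.foldl_cons, List.find?_cons]
    have hq := hb q (List.mem_cons_self)
    have hlen : (acc.set q.2.toNat (f q.1 (acc.getD q.2.toNat []))).length = acc.length := by
      simp
    have hnd' := (List.nodup_cons.1 hnd)
    have ihapp := ih (acc.set q.2.toNat (f q.1 (acc.getD q.2.toNat []))) hnd'.2
      (fun r hr => by rw [hlen]; exact hb r (List.mem_cons_of_mem _ hr)) i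
    by_cases hqi : q.2.toNat = i
    · subst hqi
      simp only [beq_self_eq_true]
      have hnone : ps.find? (fun r => r.2.toNat == q.2.toNat) = none := by
        rw [List.find?_eq_none]
        intro r hr
        have hr2 := (hb r (List.mem_cons_of_mem _ hr)).1
        have : r.2 ≠ q.2 := by
          intro h
          apply hnd'.1
          have := List.mem_map_of_mem (f := fun x => x.2) hr
          simpa [← h] using this
        simp only [beq_iff_eq]
        omega
      have ihapp2 : (List.foldl (fun a q => a.set q.2.toNat (f q.1 (a.getD q.2.toNat [])))
          (acc.set q.2.toNat (f q.1 (acc.getD q.2.toNat []))) ps).getD q.2.toNat [] =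
          (acc.set q.2.toNat (f q.1 (acc.getD q.2.toNat []))).getD q.2.toNat [] := by
        rw [ihapp, hnone]
      rw [ihapp2]
      simp only [List.getD_eq_getElem?_getD, List.getElem?_set_self']
      rw [List.getElem?_eq_getElem hq.2]
      simp
    · have : (q.2.toNat == i) = false := by simpa using hqi
      rw [this]
      have hset : (acc.set q.2.toNat (f q.1 (acc.getD q.2.toNat []))).getD i [] = acc.getD i [] := by
        simp only [List.getD_eq_getElem?_getD]
        rw [List.getElem?_set_ne hqi]
      rw [ihapp]
      simp only [List.getD_eq_getElem?_getD] at hset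
      cases hf : ps.find? (fun r => r.2.toNat == i) <;> simp [hset]


lemma foldl_set_length (f : Int → List (String × String) → List (String × String))
    (ps : List (Int × Int)) (acc : List (List (String × String))) :
    (ps.foldl (fun a q => a.set q.2.toNat (f q.1 (a.getD q.2.toNat []))) acc).length = acc.length := by
  induction ps generalizing acc with
  | nil => rfl
  | cons q ps ih => rw [List.foldl_cons, ih]; simp

-- what the finished list holds at position i once the names of S have been processed
def pvF (items : List (List (String × String))) (S : List String) (i : Nat) :
    List (String × String) :=
  if (items.map pvNm).getD i "" ∈ S then pvOut (items.map pvNm) i (items.getD i [])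
  else items.getD i []

lemma pvUpd_length (ns : List String) (n : String) (acc : List (List (String × String))) :
    (pvUpd ns n acc).length = acc.length := foldl_set_length _ _ _

lemma pvUpd_getD (items : List (List (String × String))) (n : String)
    (acc : List (List (String × String))) (hlen : acc.length = items.length)
    (i : Nat) (hi : i < items.length) :
    (pvUpd (items.map pvNm) n acc).getD i [] =
      (if (items.map pvNm).getD i "" = n ∧ ((items.map pvNm).take i).count n ≠ 0
       then pvRen n (((((items.map pvNm).take i).count n : Nat) : Int) + 1) (acc.getD i [])
       else acc.getD i []) := by
  have hns : (items.map pvNm).length = items.length := by simp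
  have hnodup : ((PySem.List.enumerate (((pvG (items.map pvNm) n)).drop 1) 2).map (·.2)).Nodup := by
    rw [PySem.List.map_snd_enumerate]
    exact (pvG_nodup (items.map pvNm) n).sublist (List.drop_sublist _ _)
  have hbounds : ∀ q ∈ PySem.List.enumerate (((pvG (items.map pvNm) n)).drop 1) 2,
      0 ≤ q.2 ∧ q.2.toNat < acc.length := by
    intro q hq
    have h2 : q.2 ∈ (pvG (items.map pvNm) n).drop 1 := by
      have := List.mem_map_of_mem (f := fun p : Int × Int => p.2) hq
      rw [PySem.List.map_snd_enumerate] at this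
      exact this
    have := pvG_mem_bounds (items.map pvNm) n q.2 (List.mem_of_mem_drop h2)
    omega
  unfold pvUpd
  rw [foldl_set_getD (pvRen n) _ acc hnodup hbounds i,
    find_pvG n (items.map pvNm) i (by omega)]
  split_ifs with h <;> rfl

lemma outer_inv (items : List (List (String × String))) :
    ∀ (ns S : List String) (acc : List (List (String × String))),
      ns.Nodup → (∀ n ∈ ns, n ∉ S) → acc.length = items.length →
      (∀ i, i < items.length → acc.getD i [] = pvF items S i) →
      (ns.foldl (fun a n => pvUpd (items.map pvNm) n a) acc).length = items.length ∧
      ∀ i, i < items.length →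
        (ns.foldl (fun a n => pvUpd (items.map pvNm) n a) acc).getD i [] = pvF items (S ++ ns) i := by
  intro ns
  induction ns with
  | nil =>
    intro S acc _ _ hlen hacc
    exact ⟨hlen, fun i hi => by simpa using hacc i hi⟩
  | cons n ns ih =>
    intro S acc hnd hdisj hlen hacc
    rw [List.foldl_cons]
    have hlen' : (pvUpd (items.map pvNm) n acc).length = items.length := by
      rw [pvUpd_length]; exact hlen
    have hacc' : ∀ i, i < items.length →
        (pvUpd (items.map pvNm) n acc).getD i [] = pvF items (S ++ [n]) i := by
      intro i hi
      rw [pvUpd_getD items n acc hlen i hi]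
      have hnS : n ∉ S := hdisj n List.mem_cons_self
      split_ifs with h
      · -- position i belongs to group n, non-first occurrence
        rw [hacc i hi]
        unfold pvF
        rw [if_neg (by rw [h.1]; exact hnS),
          if_pos (by rw [h.1]; exact List.mem_append.2 (Or.inr (List.mem_singleton_self n)))]
        unfold pvOut pvRen
        rw [h.1, if_pos h.2]
      · rw [hacc i hi]
        unfold pvF
        by_cases hmem : (items.map pvNm).getD i "" ∈ S
        · rw [if_pos hmem, if_pos (List.mem_append.2 (Or.inl hmem))]
        · rw [if_neg hmem]
          by_cases hn : (items.map pvNm).getD i "" = n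
          · rw [if_pos (List.mem_append.2 (Or.inr (List.mem_singleton.2 hn)))]
            have hc0 : ((items.map pvNm).take i).count n = 0 := by
              by_contra hc
              exact h ⟨hn, hc⟩
            unfold pvOut
            rw [hn, if_neg (by simpa using hc0)]
          · rw [if_neg (fun hmem' => (List.mem_append.1 hmem').elim hmem
                (fun h1 => hn (List.mem_singleton.1 h1)))]
    have := ih (S ++ [n]) (pvUpd (items.map pvNm) n acc) (List.nodup_cons.1 hnd).2
      (fun m hm => by
        intro hmem
        rcases List.mem_append.1 hmem with h1 | h1
        · exact hdisj m (List.mem_cons_of_mem _ hm) h1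
        · exact (List.nodup_cons.1 hnd).1 ((List.mem_singleton.1 h1) ▸ hm))
      hlen' hacc'
    constructor
    · exact this.1
    · intro i hi
      rw [this.2 i hi]
      congr 1
      simp

lemma enumerate_map {α β : Type} (f : α → β) :
    ∀ (l : List α) (s : Int),
      PySem.List.enumerate (l.map f) s = (PySem.List.enumerate l s).map (fun p => (p.1, f p.2)) := by
  intro l
  induction l with
  | nil => intro s; rfl
  | cons x xs ih => intro s; simp [PySem.List.enumerate_cons, ih]

lemma portB_eq_pvSpec (items : List (List (String × String))) :
    remove_duplicates_with_suffix_alt items = pvSpec items := by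
  -- the grouping dict, reshaped as a fold over (name, index) pairs
  have hG :
      (((PySem.List.enumerate items).map (fun p => (pvNm p.2, p.1))).foldl
        (fun d r => d.modify r.1 [] (fun l => l ++ [r.2]))
        (PySem.Dict.empty : PySem.Dict String (List Int))) =
      ((PySem.List.enumerate items).foldl
        (fun d p => d.modify (((PySem.Dict.mk p.2).get? "var_name").getD "") [] (fun l => l ++ [p.1]))
        PySem.Dict.empty) := by
    rw [List.foldl_map]
    rfl
  have hfst : ((PySem.List.enumerate items).map (fun p => (pvNm p.2, p.1))).map (·.1) =
      items.map pvNm := by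
    rw [List.map_map]
    rw [show ((fun r : String × Int => r.1) ∘ (fun p : Int × List (String × String) => (pvNm p.2, p.1))) =
        (pvNm ∘ (fun p : Int × List (String × String) => p.2)) from rfl]
    rw [← List.map_map, PySem.List.map_snd_enumerate]
  have hkeys :
      (((PySem.List.enumerate items).map (fun p => (pvNm p.2, p.1))).foldl
        (fun d r => d.modify r.1 [] (fun l => l ++ [r.2]))
        (PySem.Dict.empty : PySem.Dict String (List Int))).keys =
      PySem.Set.ofList (items.map pvNm) := by
    rw [show (fun (d : PySem.Dict String (List Int)) (r : String × Int) =>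
          d.modify r.1 [] (fun l => l ++ [r.2])) =
        (fun d r => d.modify ((fun q : String × Int => q.1) r) []
          ((fun (_ : PySem.Dict String (List Int)) (q : String × Int)
            (l : List Int) => l ++ [q.2]) d r)) from rfl]
    rw [PySem.Dict.keys_foldl_modify_key, hfst, PySem.Set.ofList_eq_foldl]
    rfl
  have hnodupG :
      (((PySem.List.enumerate items).map (fun p => (pvNm p.2, p.1))).foldl
        (fun d r => d.modify r.1 [] (fun l => l ++ [r.2]))
        (PySem.Dict.empty : PySem.Dict String (List Int))).keys.Nodup := by
    rw [hkeys]; exact PySem.Set.nodup_ofList _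
  have hgetD : ∀ m,
      (((PySem.List.enumerate items).map (fun p => (pvNm p.2, p.1))).foldl
        (fun d r => d.modify r.1 [] (fun l => l ++ [r.2]))
        (PySem.Dict.empty : PySem.Dict String (List Int))).getD m [] =
      pvG (items.map pvNm) m := by
    intro m
    rw [PySem.Dict.getD_foldl_modify_append]
    rw [show ((PySem.Dict.empty : PySem.Dict String (List Int)).getD m []) = [] from rfl,
      List.nil_append]
    unfold pvG
    rw [enumerate_map pvNm items 0]
    rw [List.filter_map (f := fun p : Int × List (String × String) => (pvNm p.2, p.1)),
      List.filter_map (f := fun p : Int × List (String × String) => (p.1, pvNm p.2)),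
      List.map_map, List.map_map]
    rfl
  have houter := outer_inv items (PySem.Set.ofList (items.map pvNm)) [] items
    (PySem.Set.nodup_ofList _) (fun n _ => List.not_mem_nil) rfl
    (fun i hi => by unfold pvF; rw [if_neg List.not_mem_nil])
  have halt : remove_duplicates_with_suffix_alt items =
      (PySem.Set.ofList (items.map pvNm)).foldl
        (fun a n => pvUpd (items.map pvNm) n a) items := by
    show ((PySem.List.enumerate items).foldl
        (fun d p => d.modify (((PySem.Dict.mk p.2).get? "var_name").getD "") [] (fun l => l ++ [p.1]))
        PySem.Dict.empty).items.foldl _ items = _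
    rw [← hG, PySem.Dict.items_eq_map_keys _ hnodupG [], hkeys, List.foldl_map]
    apply PySem.List.foldl_congr_mem
    intro acc n _
    rw [hgetD n]
    rfl
  rw [halt]
  have hlenspec : (pvSpec items).length = items.length := by
    unfold pvSpec
    rw [List.length_map, PySem.List.length_enumerate]
  apply List.ext_getElem (by rw [houter.1, hlenspec])
  intro i h1 h2
  have hi : i < items.length := by rw [houter.1] at h1; exact h1
  have hgd := houter.2 i hi
  rw [List.nil_append] at hgd
  have hmem : (items.map pvNm).getD i "" ∈ PySem.Set.ofList (items.map pvNm) := by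
    rw [PySem.Set.mem_ofList]
    rw [List.getD_eq_getElem _ _ (by simpa using hi)]
    exact List.getElem_mem _
  have hRHS : (pvSpec items)[i]'h2 = pvOut (items.map pvNm) i (items.getD i []) := by
    unfold pvSpec
    rw [List.getElem_map, PySem.List.getElem_enumerate items 0 i
      (by rw [PySem.List.length_enumerate]; exact hi)]
    simp only [Int.zero_add, Int.toNat_natCast]
    rw [List.getD_eq_getElem _ _ hi]
  rw [hRHS]
  rw [← List.getD_eq_getElem _ [] h1, hgd]
  unfold pvF
  rw [if_pos hmem]

-- ===== VERDICT (by name: the statement is the Claim_ definition above) =====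
theorem remove_duplicates_with_suffix_spec : Claim_equal_remove_duplicates_with_suffix := by
  intro items _ _
  show remove_duplicates_with_suffix items = remove_duplicates_with_suffix_alt items
  rw [portA_eq, portB_eq_pvSpec]
  exact (foldA_inv items).1
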